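-- pv_equiv track=rewrite | github.com/punyajoy/RGFS_ECAI | Data_code/data.py | process_masks
-- ===== SOURCE A (Python) =====
-- def process_masks(masks):
--     mask = []
--     for idx in range(len(masks[0])):
--         votes = 0
--         for at_mask in masks:
--             try:
--                 if at_mask[idx] == 1: votes+=1
--             except IndexError:
--                 pass
--         if votes > len(masks)/2: mask.append(1)
--         else: mask.append(0)
--     return mask
-- ===== SOURCE B (Python) =====
-- def process_masks(masks):
--     n = len(masks[0])
--     # flatten to a stream of vote events: the column index of every 1 entry
--     ones = [idx for row in masks for idx, v in enumerate(row[:n]) if v == 1]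
--     # index the events once in a hash map: column -> number of 1-votes
--     votes = {}
--     for idx in ones:
--         votes[idx] = votes.get(idx, 0) + 1
--     half = len(masks) / 2
--     return [1 if votes.get(i, 0) > half else 0 for i in range(n)]
-- ===== Notes on version B (the rewrite author's own statement) =====
-- stated objective: alternative
-- what changed: A scans all masks once per column with interleaved thresholding; B flattens the matrix into a flat stream of 1-entry column indices, builds a hash counter over that stream once, and then thresholds each column by a single dictionary lookup, so the per-column inner scan over the masks disappears.
import Mathlib
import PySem

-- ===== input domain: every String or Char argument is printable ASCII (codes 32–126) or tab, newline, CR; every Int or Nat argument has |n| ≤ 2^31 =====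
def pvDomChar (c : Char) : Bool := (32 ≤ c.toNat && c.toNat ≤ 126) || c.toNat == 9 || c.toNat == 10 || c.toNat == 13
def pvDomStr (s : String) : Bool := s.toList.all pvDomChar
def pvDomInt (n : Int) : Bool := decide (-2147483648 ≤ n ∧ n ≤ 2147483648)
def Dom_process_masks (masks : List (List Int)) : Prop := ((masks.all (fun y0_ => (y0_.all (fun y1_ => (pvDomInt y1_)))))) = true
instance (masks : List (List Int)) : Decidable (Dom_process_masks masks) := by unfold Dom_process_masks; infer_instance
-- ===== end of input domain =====

-- B replaces A's per-column scan of all masks by flattening the matrix into the stream of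
-- column indices of its 1 entries, indexing that stream once in a hash counter, and then
-- thresholding each column by one dictionary lookup; equivalence of return values is proved
-- for nonempty masks (A raises IndexError on []).

-- ===== PORT A =====
-- 'votes > len(masks)/2' on ints is rendered exactly as 2*votes > len(masks)
def process_masks (masks : List (List Int)) : List Int :=
  (List.range (masks.headD []).length).foldl
    (fun (mask : List Int) (idx : Nat) =>
      let votes : Int := masks.foldl
        (fun v am => if PySem.List.pyGet? am (idx : Int) = some 1 then v + 1 else v) 0
      if 2 * votes > (masks.length : Int) then mask ++ [1] else mask ++ [0]) []

-- ===== PORT B =====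
def process_masks_alt (masks : List (List Int)) : List Int :=
  let n := (masks.headD []).length
  let ones : List Int := masks.flatMap (fun row =>
    ((PySem.List.enumerate (PySem.List.slice row none (some (n : Int)))).filter
      (fun p => p.2 == 1)).map (·.1))
  let votes : PySem.Dict Int Int :=
    ones.foldl (fun d x => d.insert x (d.getD x 0 + 1)) PySem.Dict.empty
  (List.range n).map (fun (i : Nat) =>
    if 2 * votes.getD (i : Int) 0 > (masks.length : Int) then 1 else 0)

-- ===== PRECONDITION & SPEC =====
-- A evaluates masks[0] first and raises IndexError on the empty list; Pre_ excludes exactly that.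
def Pre_process_masks (masks : List (List Int)) : Prop := masks ≠ []
instance (masks : List (List Int)) : Decidable (Pre_process_masks masks) := by
  unfold Pre_process_masks; infer_instance
def pvWitness_process_masks : List (List Int) := [[1, 0], [1, 1], [0, 0]]
def Spec_process_masks (masks : List (List Int)) (out : List Int) : Prop := out = process_masks_alt masks
instance (masks : List (List Int)) (out : List Int) : Decidable (Spec_process_masks masks out) := by unfold Spec_process_masks; infer_instance

-- ===== CLAIM (what is proved, stated in full; the proofs are below) =====
def Claim_equal_process_masks : Prop := ∀ (masks : List (List Int)), Dom_process_masks masks → Pre_process_masks masks → Spec_process_masks masks (process_masks masks)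

-- ===== LEMMAS AND PROOFS =====

-- A's per-index vote count
def pvVotes (masks : List (List Int)) (i : Nat) : Int :=
  masks.foldl (fun v am => if PySem.List.pyGet? am (i : Int) = some 1 then v + 1 else v) 0

lemma pvVotes_shift (masks : List (List Int)) (i : Nat) (a : Int) :
    masks.foldl (fun v am => if PySem.List.pyGet? am (i : Int) = some 1 then v + 1 else v) a
    = a + pvVotes masks i := by
  induction masks generalizing a with
  | nil => simp [pvVotes]
  | cons m ms ih =>
    simp only [pvVotes, List.foldl_cons]
    rw [ih, ih (if PySem.List.pyGet? m (i : Int) = some 1 then (0:Int) + 1 else 0)]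
    split <;> ring

lemma pvVotes_cons (m : List Int) (ms : List (List Int)) (i : Nat) :
    pvVotes (m :: ms) i
    = (if PySem.List.pyGet? m (i : Int) = some 1 then (1:Int) else 0) + pvVotes ms i := by
  conv_lhs => unfold pvVotes
  rw [List.foldl_cons, pvVotes_shift ms i]
  split <;> ring

lemma pvA_map (masks : List (List Int)) :
    process_masks masks
    = (List.range (masks.headD []).length).map (fun i =>
        if 2 * pvVotes masks i > (masks.length : Int) then 1 else 0) := by
  unfold process_masks
  generalize (masks.headD []).length = n
  induction n with
  | zero => simp
  | succ n ih =>
    rw [List.range_succ, List.foldl_append, List.map_append, ih]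
    simp only [List.foldl_cons, List.foldl_nil, List.map_cons, List.map_nil, pvVotes]
    split <;> rfl

-- the per-row event list of B
def pvEvents (n : Nat) (row : List Int) : List Int :=
  ((PySem.List.enumerate (PySem.List.slice row none (some (n : Int)))).filter
    (fun p => p.2 == 1)).map (·.1)

-- counting a key in the filtered/projected enumeration of a list
lemma pvCount_enum (l : List Int) (s : Int) (i : Nat) :
    (((PySem.List.enumerate l s).filter (fun p => p.2 == 1)).map (·.1)).count (s + (i : Int))
    = if l[i]? = some 1 then 1 else 0 := by
  induction l generalizing s i with
  | nil => simp [PySem.List.enumerate_nil]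
  | cons x xs ih =>
    rw [PySem.List.enumerate_cons]
    cases i with
    | zero =>
      have htail : (((PySem.List.enumerate xs (s + 1)).filter
          (fun p => p.2 == 1)).map (·.1)).count s = 0 := by
        rw [List.count_eq_zero]
        intro hmem
        obtain ⟨p, hp, hfst⟩ := List.mem_map.mp hmem
        obtain ⟨k, hk, hpe⟩ := (PySem.List.mem_enumerate_iff _ _ _).mp
          (List.mem_of_mem_filter hp)
        rw [hpe] at hfst
        simp only at hfst
        omega
      by_cases hx : x = 1
      · subst hx
        simp only [List.filter_cons, BEq.rfl, if_true, List.map_cons, List.count_cons,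
          Int.add_zero, Nat.cast_zero, htail]
        simp
      · have hxb : (x == (1 : Int)) = false := by simp [hx]
        simp only [List.filter_cons, hxb, Bool.false_eq_true, if_false, Int.add_zero,
          Nat.cast_zero, htail]
        simp [hx]
    | succ j =>
      have hkey : s + ((j + 1 : Nat) : Int) = (s + 1) + (j : Int) := by push_cast; ring
      have hih := ih (s + 1) j
      by_cases hx : x = 1
      · subst hx
        simp only [List.filter_cons, BEq.rfl, if_true, List.map_cons, List.count_cons]
        rw [hkey, hih]
        have hne : ¬ (s = s + 1 + (j : Int)) := by omega
        simp [hne]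
      · have hxb : (x == (1 : Int)) = false := by simp [hx]
        simp only [List.filter_cons, hxb, Bool.false_eq_true, if_false]
        rw [hkey, hih]
        simp

-- B's per-row event count equals A's per-row vote indicator (columns below n)
lemma pvEvents_count (n : Nat) (row : List Int) (i : Nat) (hi : i < n) :
    (pvEvents n row).count ((i : Nat) : Int)
    = if PySem.List.pyGet? row (i : Int) = some 1 then 1 else 0 := by
  unfold pvEvents
  rw [PySem.List.slice_to_natCast]
  have h := pvCount_enum (row.take n) 0 i
  rw [Int.zero_add] at h
  rw [h, PySem.List.pyGet?_natCast]
  congr 1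
  simp [hi]

-- total count over the flattened event stream = A's vote count
lemma pvOnes_count (masks : List (List Int)) (n : Nat) (i : Nat) (hi : i < n) :
    (((masks.flatMap (pvEvents n)).count ((i : Nat) : Int) : Nat) : Int) = pvVotes masks i := by
  induction masks with
  | nil => simp [pvVotes]
  | cons m ms ih =>
    rw [List.flatMap_cons, List.count_append, pvEvents_count n m i hi, pvVotes_cons]
    push_cast [← ih]
    split <;> simp

-- ===== VERDICT (by name: the statement is the Claim_ definition above) =====
theorem process_masks_spec : Claim_equal_process_masks := by
  intro masks _ _
  unfold Spec_process_masks process_masks_alt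
  rw [pvA_map]
  simp only
  apply List.map_congr_left
  intro i hi
  rw [PySem.Dict.getD_foldl_insert_add_one, PySem.Dict.getD_empty]
  have hcnt := pvOnes_count masks (masks.headD []).length i (List.mem_range.mp hi)
  unfold pvEvents at hcnt
  rw [hcnt]
  ring_nf
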